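-- pv_equiv track=rewrite | github.com/sealinglip/leecode | 2611.老鼠和奶酪.py | miceAndCheese
-- ===== SOURCE A (Python) =====
-- from typing import List
--
-- def miceAndCheese(reward1: List[int], reward2: List[int], k: int) -> int:
--     res = sum(reward1)
--     delta = len(reward1) - k
--     if delta > 0:
--         diff = sorted(
--             [y - x for y, x in zip(reward2, reward1)], reverse=True)
--         res += sum(diff[:delta])
--
--     return res
-- ===== SOURCE B (Python) =====
-- from typing import List
--
--
-- def _top_sum(xs, m):
--     # sum of the m largest elements of xs (all of xs if m >= len(xs)),
--     # by three-way quickselect partitioning instead of sorting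
--     if m >= len(xs):
--         return sum(xs)
--     pivot = xs[len(xs) // 2]
--     gt = [x for x in xs if x > pivot]
--     if m <= len(gt):
--         return _top_sum(gt, m)
--     eq_count = xs.count(pivot)
--     if m <= len(gt) + eq_count:
--         return sum(gt) + pivot * (m - len(gt))
--     lt = [x for x in xs if x < pivot]
--     return sum(gt) + pivot * eq_count + _top_sum(lt, m - len(gt) - eq_count)
--
--
-- def miceAndCheese(reward1: List[int], reward2: List[int], k: int) -> int:
--     res = sum(reward1)
--     delta = len(reward1) - k
--     if delta > 0:
--         diff = [y - x for y, x in zip(reward2, reward1)]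
--         res += _top_sum(diff, delta)
--     return res
-- ===== Notes on version B (the rewrite author's own statement) =====
-- stated objective: alternative
-- what changed: Replaces the full descending sort of the differences by a recursive three-way quickselect (_top_sum) that sums the (n-k) largest differences directly, partitioning around a middle pivot instead of sorting.
import Mathlib
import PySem

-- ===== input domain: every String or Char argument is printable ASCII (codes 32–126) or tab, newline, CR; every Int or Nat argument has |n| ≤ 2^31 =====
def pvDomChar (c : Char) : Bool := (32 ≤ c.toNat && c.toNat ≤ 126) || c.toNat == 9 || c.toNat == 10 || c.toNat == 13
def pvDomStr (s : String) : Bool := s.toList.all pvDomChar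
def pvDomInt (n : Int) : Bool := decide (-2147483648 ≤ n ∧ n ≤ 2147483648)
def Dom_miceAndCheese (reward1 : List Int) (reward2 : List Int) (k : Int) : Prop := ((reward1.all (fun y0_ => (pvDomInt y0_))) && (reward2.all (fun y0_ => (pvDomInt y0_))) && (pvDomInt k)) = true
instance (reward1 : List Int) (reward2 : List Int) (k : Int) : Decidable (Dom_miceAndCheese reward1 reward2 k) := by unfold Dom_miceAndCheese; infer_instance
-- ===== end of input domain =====

-- B replaces A's full descending sort of the differences by a three-way quickselect
-- that sums the (n-k) largest differences directly (no full sort).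

-- ===== PORT A =====
def miceAndCheese (reward1 : List Int) (reward2 : List Int) (k : Int) : Int :=
  let res := reward1.sum
  let delta : Int := (reward1.length : Int) - k
  if 0 < delta then
    let diff := PySem.List.sorted ((reward2.zip reward1).map (fun p => p.1 - p.2)) (fun x => x) true
    res + (PySem.List.slice diff none (some delta)).sum
  else
    res

-- ===== PORT B =====
-- termination helper for topSum (the port cites it in decreasing_by)
theorem pv_getD_mem {xs : List Int} {i : Nat} (h : i < xs.length) : xs.getD i 0 ∈ xs := by
  rw [xs.getD_eq_getElem 0 h]; exact xs.getElem_mem h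

-- port of Source B's _top_sum (m is the Nat image of Python's positive int m; the
-- index len(xs)//2 is in range on the else branch, so xs[len(xs)//2] is xs.getD (len/2) 0)
def topSum (xs : List Int) (m : Nat) : Int :=
  if _h : xs.length ≤ m then xs.sum
  else
    let pivot := xs.getD (xs.length / 2) 0
    let gt := xs.filter (fun x => decide (pivot < x))
    if m ≤ gt.length then topSum gt m
    else
      let eqc := xs.count pivot
      if m ≤ gt.length + eqc then gt.sum + pivot * ((m : Int) - (gt.length : Int))
      else
        let lt := xs.filter (fun x => decide (x < pivot))
        gt.sum + pivot * (eqc : Int) + topSum lt (m - gt.length - eqc)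
termination_by xs.length
decreasing_by
  all_goals
    simp only [List.length_unattach]
    have hm : xs.getD (xs.length / 2) 0 ∈ xs := pv_getD_mem (by omega)
    calc _ < xs.attach.length :=
          List.length_filter_lt_length_iff_exists.mpr ⟨⟨_, hm⟩, List.mem_attach _ _, by simp⟩
      _ = xs.length := List.length_attach

def miceAndCheese_alt (reward1 : List Int) (reward2 : List Int) (k : Int) : Int :=
  let res := reward1.sum
  let delta : Int := (reward1.length : Int) - k
  if 0 < delta then
    let diff := (reward2.zip reward1).map (fun p => p.1 - p.2)
    res + topSum diff delta.toNat
  else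
    res

-- ===== PRECONDITION & SPEC =====
def Spec_miceAndCheese (reward1 : List Int) (reward2 : List Int) (k : Int) (out : Int) : Prop := out = miceAndCheese_alt reward1 reward2 k
instance (reward1 : List Int) (reward2 : List Int) (k : Int) (out : Int) : Decidable (Spec_miceAndCheese reward1 reward2 k out) := by unfold Spec_miceAndCheese; infer_instance

-- ===== CLAIM (what is proved, stated in full; the proofs are below) =====
def Claim_equal_miceAndCheese : Prop := ∀ (reward1 : List Int) (reward2 : List Int) (k : Int), Dom_miceAndCheese reward1 reward2 k → Spec_miceAndCheese reward1 reward2 k (miceAndCheese reward1 reward2 k)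

-- ===== LEMMAS AND PROOFS =====

-- the three filters around a pivot partition the list (as multisets)
theorem pv_partition_perm (p : Int) (xs : List Int) :
    ((xs.filter (fun x => decide (p < x)) ++ xs.filter (fun x => x == p))
      ++ xs.filter (fun x => decide (x < p))).Perm xs := by
  induction xs with
  | nil => simp
  | cons a t ih =>
    simp only [List.filter_cons]
    rcases lt_trichotomy p a with h | h | h
    · rw [if_pos (by simpa using h), if_neg (by simp; omega), if_neg (by simp; omega)]
      exact ih.cons a
    · rw [if_neg (by simp; omega), if_pos (by simp [h]), if_neg (by simp; omega)]
      have e : (t.filter (fun x => decide (p < x)) ++ a :: t.filter (fun x => x == p))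
            ++ t.filter (fun x => decide (x < p))
          = t.filter (fun x => decide (p < x))
            ++ a :: (t.filter (fun x => x == p) ++ t.filter (fun x => decide (x < p))) := by
        simp
      rw [e]
      exact List.perm_middle.trans
        (List.Perm.cons a (by simpa [List.append_assoc] using ih))
    · rw [if_neg (by simp; omega), if_neg (by simp; omega), if_pos (by simpa using h)]
      exact List.perm_middle.trans (ih.cons a)

-- the descending sort splits at any pivot: sorted-greater ++ copies of the pivot ++ sorted-smaller
theorem pv_sortD_decomp (xs : List Int) (p : Int) :
    PySem.List.sorted xs (fun x => x) true
      = (PySem.List.sorted (xs.filter (fun x => decide (p < x))) (fun x => x) true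
          ++ List.replicate (xs.count p) p)
        ++ PySem.List.sorted (xs.filter (fun x => decide (x < p))) (fun x => x) true := by
  set G := PySem.List.sorted (xs.filter (fun x => decide (p < x))) (fun x => x) true with hG
  set L := PySem.List.sorted (xs.filter (fun x => decide (x < p))) (fun x => x) true with hL
  have hrep : List.replicate (xs.count p) p = xs.filter (fun x => x == p) := by
    simpa using (List.filter_beq (l := xs) p).symm
  have permC : ((G ++ List.replicate (xs.count p) p) ++ L).Perm xs := by
    refine List.Perm.trans ?_ (pv_partition_perm p xs)
    exact List.Perm.append
      (List.Perm.append (PySem.List.sorted_perm ..) (by rw [hrep]))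
      (PySem.List.sorted_perm ..)
  have hGmem : ∀ x ∈ G, p < x := by
    intro x hx
    have := (PySem.List.mem_sorted _ _ _ _).mp hx
    simpa using (List.mem_filter.mp this).2
  have hLmem : ∀ x ∈ L, x < p := by
    intro x hx
    have := (PySem.List.mem_sorted _ _ _ _).mp hx
    simpa using (List.mem_filter.mp this).2
  have pairC : ((G ++ List.replicate (xs.count p) p) ++ L).Pairwise (fun a b => b ≤ a) := by
    refine List.pairwise_append.mpr ⟨?_, ?_, ?_⟩
    · refine List.pairwise_append.mpr ⟨?_, ?_, ?_⟩
      · exact PySem.List.sorted_pairwise_rev ..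
      · exact List.pairwise_replicate.mpr (Or.inr le_rfl)
      · intro a ha b hb
        have h1 := hGmem a ha
        have h2 : b = p := List.eq_of_mem_replicate hb
        omega
    · exact PySem.List.sorted_pairwise_rev ..
    · intro a ha b hb
      have hb' := hLmem b hb
      rcases List.mem_append.mp ha with h1 | h1
      · have := hGmem a h1; omega
      · have : a = p := List.eq_of_mem_replicate h1; omega
  exact ((PySem.List.sorted_perm ..).trans permC.symm).eq_of_pairwise
    (fun a b _ _ h1 h2 => le_antisymm h2 h1)
    (PySem.List.sorted_pairwise_rev ..) pairC

-- quickselect top-sum = sum of the first m entries of the descending sort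
theorem topSum_eq (xs : List Int) (m : Nat) :
    topSum xs m = ((PySem.List.sorted xs (fun x => x) true).take m).sum := by
  suffices H : ∀ (n : Nat) (xs : List Int) (m : Nat), xs.length ≤ n →
      topSum xs m = ((PySem.List.sorted xs (fun x => x) true).take m).sum from
    H xs.length xs m le_rfl
  intro n
  induction n with
  | zero =>
    intro xs m h
    have hx : xs = [] := List.length_eq_zero_iff.mp (Nat.le_zero.mp h)
    subst hx
    rw [topSum.eq_def]
    simp [PySem.List.sorted]
  | succ n ih =>
    intro xs m hlen
    rw [topSum.eq_def]
    by_cases h1 : xs.length ≤ m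
    · rw [dif_pos h1,
        List.take_of_length_le (by rw [PySem.List.length_sorted]; exact h1)]
      exact ((PySem.List.sorted_perm ..).sum_eq).symm
    · rw [dif_neg h1]
      set pivot := xs.getD (xs.length / 2) 0 with hp
      have hm : pivot ∈ xs := pv_getD_mem (by omega)
      set gt := xs.filter (fun x => decide (pivot < x)) with hgt
      set lt := xs.filter (fun x => decide (x < pivot)) with hlt
      set c := xs.count pivot with hc
      have hgtlen : gt.length < xs.length :=
        List.length_filter_lt_length_iff_exists.mpr ⟨pivot, hm, by simp⟩
      have hltlen : lt.length < xs.length :=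
        List.length_filter_lt_length_iff_exists.mpr ⟨pivot, hm, by simp⟩
      rw [pv_sortD_decomp xs pivot]
      set G := PySem.List.sorted gt (fun x => x) true with hG
      set L := PySem.List.sorted lt (fun x => x) true with hL
      have hGlen : G.length = gt.length := PySem.List.length_sorted ..
      have hLlen : L.length = lt.length := PySem.List.length_sorted ..
      have hGsum : G.sum = gt.sum := (PySem.List.sorted_perm ..).sum_eq
      by_cases h2 : m ≤ gt.length
      · rw [if_pos h2, List.take_append, List.take_append]
        have e1 : m - G.length = 0 := by omega
        have e2 : m - (G ++ List.replicate c pivot).length = 0 := by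
          simp only [List.length_append, List.length_replicate]; omega
        rw [e1, e2]
        simp only [List.take_zero, List.append_nil]
        exact ih gt m (by omega)
      · rw [if_neg h2]
        by_cases h3 : m ≤ gt.length + c
        · rw [if_pos h3, List.take_append, List.take_append]
          have e2 : m - (G ++ List.replicate c pivot).length = 0 := by
            simp only [List.length_append, List.length_replicate]; omega
          rw [e2]
          simp only [List.take_zero, List.append_nil,
            List.take_of_length_le (le_of_lt (by omega : G.length < m)),
            List.take_replicate]
          have emin : min (m - G.length) c = m - G.length := by omega
          rw [emin, List.sum_append, hGsum, List.sum_replicate_int]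
          have : ((m - G.length : Nat) : Int) = (m : Int) - (gt.length : Int) := by
            rw [hGlen] at *
            push_cast [Nat.cast_sub (le_of_lt (not_le.mp h2))]
            ring
          rw [this]; ring
        · rw [if_neg h3]
          show gt.sum + pivot * (c : Int) + topSum lt (m - gt.length - c)
              = (List.take m ((G ++ List.replicate c pivot) ++ L)).sum
          rw [List.take_append]
          rw [List.take_of_length_le
            (le_of_lt (by simp only [List.length_append, List.length_replicate]; omega
              : (G ++ List.replicate c pivot).length < m))]
          have e3 : m - (G ++ List.replicate c pivot).length = m - gt.length - c := by
            simp only [List.length_append, List.length_replicate]; omega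
          rw [e3, List.sum_append, List.sum_append, hGsum, List.sum_replicate_int,
            ih lt (m - gt.length - c) (by omega)]
          ring

-- ===== VERDICT (by name: the statement is the Claim_ definition above) =====
theorem miceAndCheese_spec : Claim_equal_miceAndCheese := by
  intro r1 r2 k _
  unfold Spec_miceAndCheese miceAndCheese miceAndCheese_alt
  by_cases h : 0 < (r1.length : Int) - k
  · simp only [if_pos h]
    rw [PySem.List.slice_to _ (le_of_lt h), topSum_eq]
  · simp only [if_neg h]
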